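-- pv_equiv track=rewrite | github.com/Dhaaaf/Leetcoding | scaleAI_HAckerRank/maximum_distinct.py | getMaximumDistinctCount
-- ===== SOURCE A (Python) =====
-- from collections import Counter
--
-- def getMaximumDistinctCount(a, b, k):
--     # Write your code here
--     freq_a = Counter(a)
--     freq_b = Counter(b)
--
--     for i in range(len(a)):
--         for j in range(len(b)):
--             if b[j] not in freq_a and k> 0:
--                 if freq_a[a[i]] > 1:
--                     freq_a[a[i]] -= 1
--                     a[i] = b[j]
--                     freq_a[b[j]] = 1
--                     k -= 1
--
--     return len(freq_a)
-- ===== SOURCE B (Python) =====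
-- def getMaximumDistinctCount(a, b, k):
--     seen = set(a)
--     distinct = len(seen)
--     dup = len(a) - distinct
--     avail = len(set(b) - seen)
--     return distinct + min(max(k, 0), dup, avail)
-- ===== Notes on version B (the rewrite author's own statement) =====
-- stated objective: faster
-- what changed: Replaces the O(n*m) nested scan that mutates a and a Counter with a closed-form count: answer = distinct(a) + min(max(k,0), duplicate occurrences in a, |set(b)-set(a)|), computed from two sets in one pass each.
import Mathlib
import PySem

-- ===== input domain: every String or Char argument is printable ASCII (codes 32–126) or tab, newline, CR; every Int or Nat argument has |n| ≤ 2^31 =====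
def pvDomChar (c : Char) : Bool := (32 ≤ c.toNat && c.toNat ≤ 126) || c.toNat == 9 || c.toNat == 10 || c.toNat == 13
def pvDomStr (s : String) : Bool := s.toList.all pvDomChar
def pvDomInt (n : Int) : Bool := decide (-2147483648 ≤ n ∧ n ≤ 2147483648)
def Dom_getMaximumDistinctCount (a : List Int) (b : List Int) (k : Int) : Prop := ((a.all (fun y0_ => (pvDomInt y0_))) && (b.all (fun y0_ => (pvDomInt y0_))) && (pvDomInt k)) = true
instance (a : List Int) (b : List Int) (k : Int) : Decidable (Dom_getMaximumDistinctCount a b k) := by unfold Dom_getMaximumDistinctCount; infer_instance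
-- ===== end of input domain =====

-- B replaces A's O(n*m) nested scan with the closed form distinct(a) + min(max(k,0), dups(a), |set(b)-set(a)|)
-- (faster, measured asymptotically). A mutates its argument list `a` in place; the equivalence proved here is
-- about the RETURN value only (B performs no mutation).

-- ===== PORT A =====
-- inner loop body: `for j in range(len(b)): ...` of A, on state (a, freq_a, k)
def pvInnerA (b : List Int) (i : Int)
    (st : List Int × PySem.Dict Int Int × Int) (j : Int) :
    List Int × PySem.Dict Int Int × Int :=
  let bj := PySem.List.pyGetD b j 0
  if st.2.1.contains bj = false ∧ 0 < st.2.2 then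
    let ai := PySem.List.pyGetD st.1 i 0
    if 1 < st.2.1.getD ai 0 then
      (PySem.List.pySetD st.1 i bj,
       (st.2.1.insert ai (st.2.1.getD ai 0 - 1)).insert bj 1,
       st.2.2 - 1)
    else st
  else st

def pvOuterA (b : List Int) (st : List Int × PySem.Dict Int Int × Int) (i : Int) :
    List Int × PySem.Dict Int Int × Int :=
  (PySem.List.pyRange 0 (PySem.List.len b) 1).foldl (pvInnerA b i) st

def getMaximumDistinctCount (a : List Int) (b : List Int) (k : Int) : Int :=
  let freq_a := PySem.Dict.counter a
  let freq_b := PySem.Dict.counter b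
  let st := (PySem.List.pyRange 0 (PySem.List.len a) 1).foldl (pvOuterA b) (a, freq_a, k)
  let _ := freq_b
  (st.2.1.size : Int)

-- ===== PORT B =====
def getMaximumDistinctCount_alt (a : List Int) (b : List Int) (k : Int) : Int :=
  let seen : PySem.Set Int := PySem.Set.ofList a
  let distinct : Int := PySem.Set.len seen
  let dup : Int := PySem.List.len a - distinct
  let avail : Int := PySem.Set.len (PySem.Set.diff (PySem.Set.ofList b) seen)
  distinct + min (max k 0) (min dup avail)

-- ===== PRECONDITION & SPEC =====
def Spec_getMaximumDistinctCount (a : List Int) (b : List Int) (k : Int) (out : Int) : Prop := out = getMaximumDistinctCount_alt a b k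
instance (a : List Int) (b : List Int) (k : Int) (out : Int) : Decidable (Spec_getMaximumDistinctCount a b k out) := by unfold Spec_getMaximumDistinctCount; infer_instance

-- ===== CLAIM (what is proved, stated in full; the proofs are below) =====
def Claim_equal_getMaximumDistinctCount : Prop := ∀ (a : List Int) (b : List Int) (k : Int), Dom_getMaximumDistinctCount a b k → Spec_getMaximumDistinctCount a b k (getMaximumDistinctCount a b k)

-- ===== LEMMAS AND PROOFS =====

-- A's inner-loop body with b[j] already fetched
def pvStepA (i : Int) (st : List Int × PySem.Dict Int Int × Int) (bj : Int) :
    List Int × PySem.Dict Int Int × Int :=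
  if st.2.1.contains bj = false ∧ 0 < st.2.2 then
    if 1 < st.2.1.getD (PySem.List.pyGetD st.1 i 0) 0 then
      (PySem.List.pySetD st.1 i bj,
       (st.2.1.insert (PySem.List.pyGetD st.1 i 0)
          (st.2.1.getD (PySem.List.pyGetD st.1 i 0) 0 - 1)).insert bj 1,
       st.2.2 - 1)
    else st
  else st

lemma pvOuterA_eq (b : List Int) (st : List Int × PySem.Dict Int Int × Int) (i : Int) :
    pvOuterA b st i = b.foldl (pvStepA i) st := by
  unfold pvOuterA
  rw [PySem.List.len_eq]
  exact PySem.List.foldl_pyRange_zero_pyGetD' b 0 (pvStepA i) st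

-- abstract greedy process: counts of the still-unprocessed original values (m),
-- number of still-unused distinct b-values outside the dict (aL), budget k; returns #replacements
def pvGo : List Int → Multiset Int → Nat → Int → Nat
  | [], _, _, _ => 0
  | v :: rest, m, aL, k =>
    if 0 < k ∧ 1 < m.count v ∧ 0 < aL then pvGo rest (m.erase v) (aL - 1) (k - 1) + 1
    else pvGo rest m aL k

lemma pvGo_cons (v : Int) (rest : List Int) (m : Multiset Int) (aL : Nat) (k : Int) :
    pvGo (v :: rest) m aL k =
      if 0 < k ∧ 1 < m.count v ∧ 0 < aL then pvGo rest (m.erase v) (aL - 1) (k - 1) + 1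
      else pvGo rest m aL k := rfl

-- the same process with unlimited budget and unlimited b-values
def pvUnl : List Int → Multiset Int → Nat
  | [], _ => 0
  | v :: rest, m => if 1 < m.count v then pvUnl rest (m.erase v) + 1 else pvUnl rest m

lemma pvStepA_noop (i : Nat) (st : List Int × PySem.Dict Int Int × Int) (bj : Int)
    (h : ¬ 0 < st.2.2 ∨ ¬ 1 < st.2.1.getD (st.1.getD i 0) 0) :
    pvStepA (↑i) st bj = st := by
  unfold pvStepA
  rw [PySem.List.pyGetD_natCast]
  rcases h with h | h
  · rw [if_neg]; tauto
  · simp only [if_neg h]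
    split_ifs <;> rfl

lemma pvInner_noop (bs : List Int) (i : Nat) (st : List Int × PySem.Dict Int Int × Int)
    (h : ¬ 0 < st.2.2 ∨ ¬ 1 < st.2.1.getD (st.1.getD i 0) 0) :
    bs.foldl (pvStepA (↑i)) st = st := by
  induction bs with
  | nil => rfl
  | cons x xs ih => rw [List.foldl_cons, pvStepA_noop i st x h, ih]

lemma pvInner_char (bs : List Int) (i : Nat) (a' : List Int) (d : PySem.Dict Int Int) (k : Int)
    (hi : i < a'.length) :
    bs.foldl (pvStepA (↑i)) (a', d, k) =
      if 0 < k ∧ 1 < d.getD (a'.getD i 0) 0 then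
        match bs.find? (fun v => !d.contains v) with
        | some w => (a'.set i w,
            (d.insert (a'.getD i 0) (d.getD (a'.getD i 0) 0 - 1)).insert w 1, k - 1)
        | none => (a', d, k)
      else (a', d, k) := by
  induction bs with
  | nil =>
    simp only [List.foldl_nil, List.find?_nil]
    split_ifs <;> rfl
  | cons x xs ih =>
    by_cases hk : 0 < k
    · by_cases hc : 1 < d.getD (a'.getD i 0) 0
      · by_cases hx : d.contains x = false
        · -- replacement fires at x
          have hstep : pvStepA (↑i) (a', d, k) x =
              (a'.set i x, (d.insert (a'.getD i 0) (d.getD (a'.getD i 0) 0 - 1)).insert x 1,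
               k - 1) := by
            unfold pvStepA
            rw [PySem.List.pyGetD_natCast, if_pos ⟨hx, hk⟩, if_pos hc,
              PySem.List.pySetD_natCast]
          rw [List.foldl_cons, hstep]
          have hrest : xs.foldl (pvStepA (↑i))
              (a'.set i x, (d.insert (a'.getD i 0) (d.getD (a'.getD i 0) 0 - 1)).insert x 1,
               k - 1) = _ := pvInner_noop xs i _ (by
            right
            have h1 : (a'.set i x).getD i 0 = x := by
              rw [List.getD_eq_getElem _ 0 (by simpa using hi)]
              exact List.getElem_set_self _
            simp only [h1, PySem.Dict.getD_insert_self]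
            omega)
          rw [hrest, if_pos ⟨hk, hc⟩]
          have : (x :: xs).find? (fun v => !d.contains v) = some x := by
            rw [List.find?_cons_of_pos]; simp [hx]
          rw [this]
        · -- x already a key: skip
          have hx' : d.contains x = true := by
            cases h : d.contains x with
            | false => exact absurd h hx
            | true => rfl
          have hstep : pvStepA (↑i) (a', d, k) x = (a', d, k) := by
            unfold pvStepA
            rw [if_neg]; simp [hx']
          rw [List.foldl_cons, hstep, ih]
          have : (x :: xs).find? (fun v => !d.contains v) = xs.find? (fun v => !d.contains v) := by
            rw [List.find?_cons_of_neg]; simp [hx']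
          rw [this]
      · -- count ≤ 1: nothing ever happens
        rw [List.foldl_cons, pvStepA_noop i _ x (Or.inr hc), pvInner_noop xs i _ (Or.inr hc),
          if_neg (by tauto)]
    · rw [List.foldl_cons, pvStepA_noop i _ x (Or.inl hk), pvInner_noop xs i _ (Or.inl hk),
        if_neg (by tauto)]

-- loop invariant: the dict's counts agree with m on the unprocessed suffix, its key set
-- misses exactly aL distinct b-values, and each replacement grows the key count by one
lemma pv_bridge (bs : List Int) (l : List Int) : ∀ (i : Nat) (a' : List Int)
    (d : PySem.Dict Int Int) (k : Int) (m : Multiset Int) (aL : Nat),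
    a'.drop i = l →
    (∀ v ∈ l, d.getD v 0 = (m.count v : Int)) →
    (∀ v ∈ l, 1 ≤ m.count v) →
    (bs.toFinset \ d.keys.toFinset).card = aL →
    d.keys.Nodup →
    ((List.range' i l.length).foldl (fun st (j : Nat) => bs.foldl (pvStepA (↑j)) st) (a', d, k)).2.1.size
      = d.size + pvGo l m aL k := by
  induction l with
  | nil => intro i a' d k m aL _ _ _ _ _; simp [pvGo]
  | cons v rest ih =>
    intro i a' d k m aL hdrop h2 h5 h3 h6
    have hi : i < a'.length := by
      by_contra h
      rw [List.drop_eq_nil_iff.mpr (by omega)] at hdrop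
      exact List.cons_ne_nil _ _ hdrop.symm
    have hai : a'.getD i 0 = v := by
      have h0 : a'[i]? = some v := by
        have h1 : (List.drop i a')[0]? = a'[i + 0]? := List.getElem?_drop
        rw [hdrop] at h1
        simpa using h1.symm
      rw [List.getD_eq_getElem?_getD, h0]
      rfl
    have hrest : a'.drop (i + 1) = rest := by
      have : List.drop 1 (List.drop i a') = List.drop (i + 1) a' := List.drop_drop
      rw [← this, hdrop]; rfl
    have hlen : (v :: rest).length = rest.length + 1 := rfl
    rw [hlen, List.range'_succ, List.foldl_cons, pvInner_char bs i a' d k hi, hai]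
    by_cases hk : 0 < k
    · by_cases hc : 1 < d.getD v 0
      · have hcnt : 1 < m.count v := by
          have := h2 v (by simp); rw [this] at hc; exact_mod_cast hc
        rw [if_pos ⟨hk, hc⟩]
        cases hfind : bs.find? (fun x => !d.contains x) with
        | none =>
          -- no unused b-value: aL = 0, nothing changes any more
          have hsub : bs.toFinset \ d.keys.toFinset = ∅ := by
            rw [Finset.sdiff_eq_empty_iff_subset]
            intro x hx
            rw [List.mem_toFinset] at hx
            have := List.find?_eq_none.mp hfind x hx
            rw [List.mem_toFinset, ← PySem.Dict.contains_iff_mem_keys]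
            simpa using this
          have haL : aL = 0 := by rw [← h3, hsub]; simp
          rw [pvGo_cons, if_neg (by omega)]
          exact ih (i + 1) a' d k m aL hrest
            (fun u hu => h2 u (by simp [hu])) (fun u hu => h5 u (by simp [hu])) h3 h6
        | some w =>
          have hwmem : w ∈ bs := List.mem_of_find?_eq_some hfind
          have hwcont : d.contains w = false := by
            have := List.find?_some hfind; simpa using this
          have hvcont : d.contains v = true := by
            cases h : d.contains v with
            | true => rfl
            | false =>
              have : d.get? v = none := (PySem.Dict.get?_eq_none_iff_contains d v).mpr h
              rw [PySem.Dict.getD_eq_get?_getD, this] at hc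
              simp at hc
          have hwv : w ≠ v := fun h => by rw [h, hvcont] at hwcont; cases hwcont
          set c := d.getD v 0 with hcdef
          set d'' := (d.insert v (c - 1)).insert w 1 with hd''
          -- keys of d''
          have hk1 : (d.insert v (c - 1)).keys = d.keys := PySem.Dict.keys_insert_of_contains d _ hvcont
          have hcont2 : (d.insert v (c - 1)).contains w = false := by
            rw [PySem.Dict.contains_insert]
            simp [hwv, hwcont]
          have hkeys'' : d''.keys = d.keys ++ [w] := by
            rw [hd'', PySem.Dict.keys_insert_of_not_contains _ _ hcont2, hk1]
          have hwnotin : w ∉ d.keys := fun h => by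
            rw [← PySem.Dict.contains_iff_mem_keys] at h; rw [h] at hwcont; cases hwcont
          have hnodup'' : d''.keys.Nodup := by
            rw [hkeys'']
            refine List.Nodup.append h6 (List.nodup_singleton w) ?_
            intro x hx hxw
            rw [List.mem_singleton] at hxw
            exact hwnotin (hxw ▸ hx)
          have hsize'' : d''.size = d.size + 1 := by
            rw [hd'', PySem.Dict.size_insert, if_neg (by simp [hcont2]),
              PySem.Dict.size_insert, if_pos hvcont]
          have hwsd : w ∈ bs.toFinset \ d.keys.toFinset := by
            rw [Finset.mem_sdiff, List.mem_toFinset, List.mem_toFinset]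
            exact ⟨hwmem, hwnotin⟩
          have haLpos : 0 < aL := by
            rw [← h3]; exact Finset.card_pos.mpr ⟨w, hwsd⟩
          have hcard'' : (bs.toFinset \ d''.keys.toFinset).card = aL - 1 := by
            rw [hkeys'']
            have : (d.keys ++ [w]).toFinset = insert w d.keys.toFinset := by
              rw [List.toFinset_append]; simp [Finset.union_singleton]
            rw [this, Finset.sdiff_insert, Finset.card_erase_of_mem hwsd, h3]
          -- counts of d'' on rest
          have h2'' : ∀ u ∈ rest, d''.getD u 0 = ((m.erase v).count u : Int) := by
            intro u hu
            have hucnt : 1 ≤ m.count u := h5 u (by simp [hu])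
            have hucont : d.contains u = true := by
              cases h : d.contains u with
              | true => rfl
              | false =>
                have hnone : d.get? u = none := (PySem.Dict.get?_eq_none_iff_contains d u).mpr h
                have := h2 u (by simp [hu])
                rw [PySem.Dict.getD_eq_get?_getD, hnone] at this
                simp at this; omega
            have huw : u ≠ w := fun h => by rw [h, hwcont] at hucont; cases hucont
            rw [hd'', PySem.Dict.getD_insert_of_ne _ _ _ huw]
            by_cases huv : u = v
            · subst huv
              rw [PySem.Dict.getD_insert_self, Multiset.count_erase_self, hcdef,
                h2 u (by simp)]
              omega
            · rw [PySem.Dict.getD_insert_of_ne _ _ _ huv, Multiset.count_erase_of_ne huv,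
                h2 u (by simp [hu])]
          have h5'' : ∀ u ∈ rest, 1 ≤ (m.erase v).count u := by
            intro u hu
            by_cases huv : u = v
            · subst huv; rw [Multiset.count_erase_self]; omega
            · rw [Multiset.count_erase_of_ne huv]; exact h5 u (by simp [hu])
          have hdrop'' : (a'.set i w).drop (i + 1) = rest := by
            rw [List.drop_set, if_pos (by omega)]; exact hrest
          rw [pvGo_cons, if_pos ⟨hk, hcnt, haLpos⟩]
          have := ih (i + 1) (a'.set i w) d'' (k - 1) (m.erase v) (aL - 1)
            hdrop'' h2'' h5'' hcard'' hnodup''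
          rw [this, hsize'']; omega
      · -- count ≤ 1: no replacement at this index
        rw [if_neg (by tauto)]
        have hcnt : ¬ 1 < m.count v := by
          intro h
          apply hc
          rw [h2 v (by simp)]; exact_mod_cast h
        rw [pvGo_cons, if_neg (by tauto)]
        exact ih (i + 1) a' d k m aL hrest
          (fun u hu => h2 u (by simp [hu])) (fun u hu => h5 u (by simp [hu])) h3 h6
    · rw [if_neg (by tauto)]
      rw [pvGo_cons, if_neg (by tauto)]
      exact ih (i + 1) a' d k m aL hrest
        (fun u hu => h2 u (by simp [hu])) (fun u hu => h5 u (by simp [hu])) h3 h6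

-- the limited greedy is the unlimited one capped by both resources
lemma pvGo_eq_min (l : List Int) : ∀ (m : Multiset Int) (aL : Nat) (k : Int),
    pvGo l m aL k = min (pvUnl l m) (min aL k.toNat) := by
  induction l with
  | nil => intro m aL k; simp [pvGo, pvUnl]
  | cons v rest ih =>
    intro m aL k
    unfold pvGo pvUnl
    by_cases hc : 1 < m.count v
    · rw [if_pos hc]
      by_cases hres : 0 < k ∧ 0 < aL
      · rw [if_pos ⟨hres.1, hc, hres.2⟩, ih]
        have : (k - 1).toNat = k.toNat - 1 := by omega
        rw [this]
        omega
      · rw [if_neg (by tauto), ih]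
        omega
    · rw [if_neg hc, if_neg (by tauto), ih]

-- with counts matching the list, the unlimited greedy removes exactly the duplicate occurrences
lemma pvUnl_eq (l : List Int) : ∀ (m : Multiset Int),
    (∀ v ∈ l, m.count v = l.count v) →
    pvUnl l m + l.toFinset.card = l.length := by
  induction l with
  | nil => intro m _; simp [pvUnl]
  | cons v rest ih =>
    intro m h
    have hv : m.count v = rest.count v + 1 := by
      rw [h v (by simp)]; simp
    unfold pvUnl
    by_cases hmem : v ∈ rest
    · have hpos : 0 < rest.count v := List.count_pos_iff.mpr hmem
      rw [if_pos (by omega)]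
      have hrec := ih (m.erase v) (by
        intro u hu
        by_cases huv : u = v
        · subst huv
          rw [Multiset.count_erase_self, hv]
          simp
        · rw [Multiset.count_erase_of_ne huv, h u (by simp [hu])]
          simp [Ne.symm huv])
      have hfin : (v :: rest).toFinset = rest.toFinset := by
        simp [List.toFinset_cons, Finset.insert_eq_self.mpr (List.mem_toFinset.mpr hmem)]
      rw [hfin]
      simp only [List.length_cons]
      omega
    · have hz : rest.count v = 0 := List.count_eq_zero.mpr hmem
      rw [if_neg (by omega)]
      have hrec := ih m (by
        intro u hu
        have huv : u ≠ v := fun h' => hmem (h' ▸ hu)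
        rw [h u (by simp [hu])]
        simp [Ne.symm huv])
      have hfin : (v :: rest).toFinset.card = rest.toFinset.card + 1 := by
        rw [List.toFinset_cons, Finset.card_insert_of_notMem (by simp [hmem])]
      rw [hfin]
      simp only [List.length_cons]
      omega

lemma pv_set_toFinset (xs : List Int) : (PySem.Set.ofList xs).toFinset = xs.toFinset := by
  apply Finset.ext
  intro x
  simp [List.mem_toFinset, PySem.Set.mem_ofList]

lemma pv_set_len (xs : List Int) : (PySem.Set.ofList xs).length = xs.toFinset.card := by
  rw [← pv_set_toFinset, List.toFinset_card_of_nodup (PySem.Set.nodup_ofList xs)]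

lemma pv_diff_len (a b : List Int) :
    (PySem.Set.diff (PySem.Set.ofList b) (PySem.Set.ofList a)).length
      = (b.toFinset \ a.toFinset).card := by
  have hnd := PySem.Set.nodup_diff (PySem.Set.ofList b) (PySem.Set.ofList a)
    (PySem.Set.nodup_ofList b)
  rw [← List.toFinset_card_of_nodup hnd]
  congr 1
  apply Finset.ext
  intro x
  simp [List.mem_toFinset, PySem.Set.mem_diff, PySem.Set.mem_ofList, Finset.mem_sdiff]

lemma pv_dict_size_keys (d : PySem.Dict Int Int) : d.size = d.keys.length := by
  simp [PySem.Dict.size, PySem.Dict.keys]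

-- ===== VERDICT (by name: the statement is the Claim_ definition above) =====
theorem getMaximumDistinctCount_spec : Claim_equal_getMaximumDistinctCount := by
  unfold Claim_equal_getMaximumDistinctCount Spec_getMaximumDistinctCount
  intro a b k _
  simp only [getMaximumDistinctCount, getMaximumDistinctCount_alt]
  -- rewrite the outer loop to a fold over Nat indices
  have houter : (PySem.List.pyRange 0 (PySem.List.len a) 1).foldl (pvOuterA b)
      (a, PySem.Dict.counter a, k)
      = (List.range' 0 a.length).foldl (fun st (j : Nat) => b.foldl (pvStepA (↑j)) st)
        (a, PySem.Dict.counter a, k) := by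
    rw [PySem.List.len_eq, PySem.List.pyRange_zero_nat, List.foldl_map, ← List.range_eq_range']
    simp only [pvOuterA_eq]
  rw [houter]
  set D := a.toFinset.card with hD
  set aL0 := (b.toFinset \ a.toFinset).card with haL0
  have hbridge := pv_bridge b a 0 a (PySem.Dict.counter a) k (↑a) aL0
    (by simp)
    (by intro v _; rw [PySem.Dict.getD_counter, Multiset.coe_count])
    (by intro v hv; rw [Multiset.coe_count]; exact List.count_pos_iff.mpr hv)
    (by rw [PySem.Dict.keys_counter, pv_set_toFinset])
    (by rw [PySem.Dict.keys_counter]; exact PySem.Set.nodup_ofList a)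
  rw [hbridge]
  have hsize0 : (PySem.Dict.counter a).size = D := by
    rw [pv_dict_size_keys, PySem.Dict.keys_counter, pv_set_len]
  have hgo : pvGo a (↑a) aL0 k = min (pvUnl a ↑a) (min aL0 k.toNat) := pvGo_eq_min a ↑a aL0 k
  have hunl : pvUnl a ↑a + D = a.length := pvUnl_eq a ↑a (by
    intro v _; rw [Multiset.coe_count])
  have hDle : D ≤ a.length := List.toFinset_card_le a
  rw [hsize0, hgo]
  have hlen1 : PySem.Set.len (PySem.Set.ofList a) = (D : Int) := by
    simp [PySem.Set.len, pv_set_len]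
    exact hD.symm
  have hlen2 : PySem.Set.len (PySem.Set.diff (PySem.Set.ofList b) (PySem.Set.ofList a))
      = (aL0 : Int) := by
    simp [PySem.Set.len, pv_diff_len]
    exact haL0.symm
  rw [hlen1, hlen2, PySem.List.len_eq]
  push_cast
  omega
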